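-- pv_equiv track=rewrite | github.com/AlcalinoGitHub/PPE | mysite/Content/views.py | CorrectWording
-- ===== SOURCE A (Python) =====
-- def CorrectWording(texto):
--     altisonantes =  ["verga", "puto", "puta", "hijo de", "pinche", "chinga", "chinguen", "chingo"]
--     texto = texto.lower()
--     texto = texto.split(' ')
--     for i in altisonantes:
--         if i in texto:
--             return (i)
--     return None
-- ===== SOURCE B (Python) =====
-- def CorrectWording(texto):
--     altisonantes = ["verga", "puto", "puta", "hijo de", "pinche", "chinga", "chinguen", "chingo"]
--     rank = {w: i for i, w in enumerate(altisonantes)}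
--     best = None
--     for token in texto.lower().split(' '):
--         i = rank.get(token)
--         if i is not None and (best is None or i < best):
--             best = i
--     return None if best is None else altisonantes[best]
-- ===== Notes on version B (the rewrite author's own statement) =====
-- stated objective: faster
-- what changed: Replaces A's eight membership scans over the token list (one per bad word) with a precomputed word->index table and a single pass over the tokens keeping the minimal index.
import Mathlib
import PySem

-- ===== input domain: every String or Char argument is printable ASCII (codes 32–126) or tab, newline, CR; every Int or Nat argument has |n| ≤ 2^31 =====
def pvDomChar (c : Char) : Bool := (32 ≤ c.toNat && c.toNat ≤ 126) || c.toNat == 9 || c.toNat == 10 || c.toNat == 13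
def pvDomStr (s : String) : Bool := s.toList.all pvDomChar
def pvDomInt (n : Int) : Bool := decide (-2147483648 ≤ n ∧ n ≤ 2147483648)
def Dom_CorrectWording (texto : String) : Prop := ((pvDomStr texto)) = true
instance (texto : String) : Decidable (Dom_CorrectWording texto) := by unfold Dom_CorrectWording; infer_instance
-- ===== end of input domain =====

-- B replaces A's eight membership scans of the token list by one pass over the
-- tokens against a precomputed word→index table, keeping the minimal index (faster on long texts).

-- ===== PORT A =====
-- A's literal list of bad words
def pvAWords : List String :=
  ["verga", "puto", "puta", "hijo de", "pinche", "chinga", "chinguen", "chingo"]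

-- A's for-loop over altisonantes: return the first word that occurs among the tokens
def pvALoop (ws : List String) (toks : List String) : Option String :=
  match ws with
  | [] => none
  | w :: rest => if w ∈ toks then some w else pvALoop rest toks

def CorrectWording (texto : String) : Option String :=
  pvALoop pvAWords ((PySem.Str.split? (PySem.Str.lower texto) " ").getD [])

-- ===== PORT B =====
def pvBWords : List String :=
  ["verga", "puto", "puta", "hijo de", "pinche", "chinga", "chinguen", "chingo"]

-- rank = {w: i for i, w in enumerate(altisonantes)}
def pvBRank : PySem.Dict String Nat :=
  PySem.Dict.ofList ((PySem.List.enumerate pvBWords).map (fun p => (p.2, p.1.toNat)))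

-- the loop body: i = rank.get(token); if i is not None and (best is None or i < best): best = i
def pvBStep (best : Option Nat) (t : String) : Option Nat :=
  match pvBRank.get? t with
  | none => best
  | some i =>
    match best with
    | none => some i
    | some b => if i < b then some i else best

def CorrectWording_alt (texto : String) : Option String :=
  match ((PySem.Str.split? (PySem.Str.lower texto) " ").getD []).foldl pvBStep none with
  | none => none
  | some b => some (pvBWords.getD b "")   -- altisonantes[best]; best is always an index < 8

-- ===== PRECONDITION & SPEC =====
def Spec_CorrectWording (texto : String) (out : Option String) : Prop := out = CorrectWording_alt texto
instance (texto : String) (out : Option String) : Decidable (Spec_CorrectWording texto out) := by unfold Spec_CorrectWording; infer_instance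

-- ===== CLAIM (what is proved, stated in full; the proofs are below) =====
def Claim_equal_CorrectWording : Prop := ∀ (texto : String), Dom_CorrectWording texto → Spec_CorrectWording texto (CorrectWording texto)

-- ===== LEMMAS AND PROOFS =====

-- option-minimum (helper for reasoning about B's fold)
def pvOmin : Option Nat → Option Nat → Option Nat
  | none, y => y
  | some a, none => some a
  | some a, some b => some (min a b)

theorem pvOmin_none_left (y : Option Nat) : pvOmin none y = y := rfl

theorem pvOmin_none_right (x : Option Nat) : pvOmin x none = x := by cases x <;> rfl

theorem pvOmin_assoc (x y z : Option Nat) : pvOmin (pvOmin x y) z = pvOmin x (pvOmin y z) := by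
  cases x <;> cases y <;> cases z <;> simp [pvOmin, Nat.min_assoc]

theorem pvBStep_eq_omin (o : Option Nat) (t : String) :
    pvBStep o t = pvOmin o (pvBRank.get? t) := by
  unfold pvBStep
  cases h : pvBRank.get? t with
  | none => cases o <;> simp [pvOmin]
  | some i =>
    cases o with
    | none => simp [pvOmin]
    | some b =>
      simp only [pvOmin]
      split_ifs with hlt
      · simp [Nat.min_eq_right (Nat.le_of_lt hlt)]
      · simp [Nat.min_eq_left (Nat.le_of_not_lt hlt)]

-- the fold from any accumulator is pvOmin of the accumulator and the fold from none
theorem pvFoldl_omin (toks : List String) :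
    ∀ o : Option Nat, toks.foldl pvBStep o = pvOmin o (toks.foldl pvBStep none) := by
  induction toks with
  | nil => intro o; simp [List.foldl, pvOmin_none_right]
  | cons t ts ih =>
    intro o
    simp only [List.foldl]
    rw [ih (pvBStep o t), ih (pvBStep none t), pvBStep_eq_omin, pvBStep_eq_omin,
      pvOmin_none_left, pvOmin_assoc]

-- recursive characterisation of B's fold
theorem pvFoldl_cons (t : String) (ts : List String) :
    (t :: ts).foldl pvBStep none = pvOmin (pvBRank.get? t) (ts.foldl pvBStep none) := by
  simp only [List.foldl]
  rw [pvFoldl_omin ts (pvBStep none t), pvBStep_eq_omin, pvOmin_none_left]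

-- rank looks up exactly the index of a word
theorem pvRank_word : ∀ k : Nat, k < 8 → pvBRank.get? (pvBWords.getD k "") = some k := by decide

theorem pvRank_some (t : String) (j : Nat) (h : pvBRank.get? t = some j) :
    j < 8 ∧ pvBWords.getD j "" = t := by
  have hd : pvBRank = PySem.Dict.mk
      [("verga", 0), ("puto", 1), ("puta", 2), ("hijo de", 3),
       ("pinche", 4), ("chinga", 5), ("chinguen", 6), ("chingo", 7)] := by decide
  rw [hd] at h
  simp only [PySem.Dict.get?_mk_cons, beq_iff_eq] at h
  split_ifs at h with h0 h1 h2 h3 h4 h5 h6 h7 <;>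
    first
      | (obtain ⟨rfl⟩ := Option.some.inj h
         constructor
         · omega
         · first | (subst h0; rfl) | (subst h1; rfl) | (subst h2; rfl) | (subst h3; rfl)
                 | (subst h4; rfl) | (subst h5; rfl) | (subst h6; rfl) | (subst h7; rfl))
      | simp [PySem.Dict.get?] at h

-- if the fold yields some j, some token has rank j
theorem pvM_achieved : ∀ (toks : List String) (j : Nat),
    toks.foldl pvBStep none = some j → ∃ t ∈ toks, pvBRank.get? t = some j := by
  intro toks
  induction toks with
  | nil => intro j h; simp [List.foldl] at h
  | cons t ts ih =>
    intro j h
    rw [pvFoldl_cons] at h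
    cases hr : pvBRank.get? t with
    | none =>
      rw [hr, pvOmin_none_left] at h
      obtain ⟨u, hu, hru⟩ := ih j h
      exact ⟨u, List.mem_cons_of_mem _ hu, hru⟩
    | some a =>
      cases hm : ts.foldl pvBStep none with
      | none =>
        rw [hr, hm, pvOmin_none_right] at h
        exact ⟨t, List.mem_cons_self, by rw [hr, h]⟩
      | some b =>
        rw [hr, hm] at h
        simp only [pvOmin, Option.some.injEq] at h
        rcases Nat.le_total a b with hab | hba
        · rw [Nat.min_eq_left hab] at h
          exact ⟨t, List.mem_cons_self, by rw [hr, h]⟩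
        · rw [Nat.min_eq_right hba] at h
          obtain ⟨u, hu, hru⟩ := ih b hm
          exact ⟨u, List.mem_cons_of_mem _ hu, by rw [hru, h]⟩

-- any token with a rank bounds the fold's value
theorem pvM_le : ∀ (toks : List String) (t : String) (i : Nat),
    t ∈ toks → pvBRank.get? t = some i →
    ∃ j, toks.foldl pvBStep none = some j ∧ j ≤ i := by
  intro toks
  induction toks with
  | nil => intro t i h; simp at h
  | cons u ts ih =>
    intro t i hmem hr
    rw [pvFoldl_cons]
    rcases List.mem_cons.mp hmem with rfl | hts
    · rw [hr]
      cases hm : ts.foldl pvBStep none with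
      | none => exact ⟨i, by simp [pvOmin], le_refl i⟩
      | some b => exact ⟨min i b, by simp [pvOmin], Nat.min_le_left i b⟩
    · obtain ⟨j, hj, hji⟩ := ih t i hts hr
      rw [hj]
      cases hr' : pvBRank.get? u with
      | none => exact ⟨j, by simp [pvOmin], hji⟩
      | some a => exact ⟨min a j, by simp [pvOmin], le_trans (Nat.min_le_right a j) hji⟩

-- if word k is among the tokens and no earlier word is, the fold yields exactly k
theorem pvM_eq_some (toks : List String) (k : Nat) (hk : k < 8)
    (hmem : pvBWords.getD k "" ∈ toks)
    (hnot : ∀ j, j < k → pvBWords.getD j "" ∉ toks) :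
    toks.foldl pvBStep none = some k := by
  obtain ⟨j, hj, hjk⟩ := pvM_le toks _ k hmem (pvRank_word k hk)
  obtain ⟨t, ht, hrt⟩ := pvM_achieved toks j hj
  obtain ⟨hj8, hw⟩ := pvRank_some t j hrt
  rcases Nat.lt_or_ge j k with hlt | hge
  · exact absurd (hw ▸ ht) (hnot j hlt)
  · have : j = k := le_antisymm hjk hge
    rw [← this]; exact hj

-- if no word is among the tokens, the fold yields none
theorem pvM_eq_none (toks : List String)
    (hall : ∀ j, j < 8 → pvBWords.getD j "" ∉ toks) :
    toks.foldl pvBStep none = none := by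
  cases h : toks.foldl pvBStep none with
  | none => rfl
  | some j =>
    obtain ⟨t, ht, hrt⟩ := pvM_achieved toks j h
    obtain ⟨hj8, hw⟩ := pvRank_some t j hrt
    exact absurd (hw ▸ ht) (hall j hj8)

-- main lemma: for any token list, A's scan over the words equals B's min-rank pass
theorem pvMain (toks : List String) :
    pvALoop pvAWords toks =
      (match toks.foldl pvBStep none with
       | none => none
       | some b => some (pvBWords.getD b "")) := by
  by_cases h0 : "verga" ∈ toks
  · rw [pvM_eq_some toks 0 (by omega) h0 (by intro j hj; omega)]
    simp [pvALoop, pvAWords, h0, pvBWords]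
  · by_cases h1 : "puto" ∈ toks
    · rw [pvM_eq_some toks 1 (by omega) h1
        (by intro j hj; interval_cases j <;> simpa [pvBWords] using h0)]
      simp [pvALoop, pvAWords, h0, h1, pvBWords]
    · by_cases h2 : "puta" ∈ toks
      · rw [pvM_eq_some toks 2 (by omega) h2
          (by intro j hj; interval_cases j <;> simp [pvBWords] <;> assumption)]
        simp [pvALoop, pvAWords, h0, h1, h2, pvBWords]
      · by_cases h3 : "hijo de" ∈ toks
        · rw [pvM_eq_some toks 3 (by omega) h3
            (by intro j hj; interval_cases j <;> simp [pvBWords] <;> assumption)]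
          simp [pvALoop, pvAWords, h0, h1, h2, h3, pvBWords]
        · by_cases h4 : "pinche" ∈ toks
          · rw [pvM_eq_some toks 4 (by omega) h4
              (by intro j hj; interval_cases j <;> simp [pvBWords] <;> assumption)]
            simp [pvALoop, pvAWords, h0, h1, h2, h3, h4, pvBWords]
          · by_cases h5 : "chinga" ∈ toks
            · rw [pvM_eq_some toks 5 (by omega) h5
                (by intro j hj; interval_cases j <;> simp [pvBWords] <;> assumption)]
              simp [pvALoop, pvAWords, h0, h1, h2, h3, h4, h5, pvBWords]
            · by_cases h6 : "chinguen" ∈ toks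
              · rw [pvM_eq_some toks 6 (by omega) h6
                  (by intro j hj; interval_cases j <;> simp [pvBWords] <;> assumption)]
                simp [pvALoop, pvAWords, h0, h1, h2, h3, h4, h5, h6, pvBWords]
              · by_cases h7 : "chingo" ∈ toks
                · rw [pvM_eq_some toks 7 (by omega) h7
                    (by intro j hj; interval_cases j <;> simp [pvBWords] <;> assumption)]
                  simp [pvALoop, pvAWords, h0, h1, h2, h3, h4, h5, h6, h7, pvBWords]
                · rw [pvM_eq_none toks
                    (by intro j hj; interval_cases j <;> simp [pvBWords] <;> assumption)]
                  simp [pvALoop, pvAWords, h0, h1, h2, h3, h4, h5, h6, h7]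

-- ===== VERDICT (by name: the statement is the Claim_ definition above) =====
theorem CorrectWording_spec : Claim_equal_CorrectWording := by
  intro texto _
  unfold Spec_CorrectWording CorrectWording CorrectWording_alt
  exact pvMain _
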